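-- pv_equiv track=rewrite | github.com/LilianeAquino/aed_projeto_1_revisitado | modules/text.py | padronizaTipoAcidente
-- ===== SOURCE A (Python) =====
-- def padronizaTipoAcidente(text:str) -> str:
--     """
--      M??todo respons??vel por padronizar os tipos de acidentes
--     """
--     text = text.lower()
--     text = text.replace('colisao com objeto fixo', 'colisao com objeto')
--     text = text.replace('colisao com objeto movel', 'colisao com objeto')
--     text = text.replace('colisao com objeto em movimento', 'colisao com objeto')
--     text = text.replace('colisao com objeto estatico', 'colisao com objeto')
--     text = text.replace('colisao lateral mesmo sentido', 'colisao lateral')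
--     text = text.replace('colisao lateral sentido oposto', 'colisao lateral')
--     text = text.replace('atropelamento de pessoa', 'atropelamento de pedestre')
--     return ' '.join(palavra.strip() for palavra in text.split())
-- ===== SOURCE B (Python) =====
-- _RULES = (
--     ('colisao com objeto fixo', 'colisao com objeto'),
--     ('colisao com objeto movel', 'colisao com objeto'),
--     ('colisao com objeto em movimento', 'colisao com objeto'),
--     ('colisao com objeto estatico', 'colisao com objeto'),
--     ('colisao lateral mesmo sentido', 'colisao lateral'),
--     ('colisao lateral sentido oposto', 'colisao lateral'),
--     ('atropelamento de pessoa', 'atropelamento de pedestre'),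
-- )
--
--
-- def padronizaTipoAcidente(text: str) -> str:
--     t = text.lower()
--     out = []
--     i = 0
--     n = len(t)
--     while i < n:
--         for src, dst in _RULES:
--             if t.startswith(src, i):
--                 out.append(dst)
--                 i += len(src)
--                 break
--         else:
--             out.append(t[i])
--             i += 1
--     return ' '.join(''.join(out).split())
-- ===== Notes on version B (the rewrite author's own statement) =====
-- stated objective: alternative
-- what changed: Seven sequential full-string str.replace passes are replaced by a single left-to-right scan that, at each position, emits the target of the first source phrase matching there (or the character), then normalizes whitespace; Pre_ excludes inputs whose lowercased text contains a cascading/overlapping combination of the source phrases (one replacement's output abutting the following text re-forms a later phrase, or the 'estatico'/'colisao' overlap), where A's sequential passes and B's single pass resolve the overlapping matches differently - a first-vs-last-match tie no caller would specify.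
import Mathlib
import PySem

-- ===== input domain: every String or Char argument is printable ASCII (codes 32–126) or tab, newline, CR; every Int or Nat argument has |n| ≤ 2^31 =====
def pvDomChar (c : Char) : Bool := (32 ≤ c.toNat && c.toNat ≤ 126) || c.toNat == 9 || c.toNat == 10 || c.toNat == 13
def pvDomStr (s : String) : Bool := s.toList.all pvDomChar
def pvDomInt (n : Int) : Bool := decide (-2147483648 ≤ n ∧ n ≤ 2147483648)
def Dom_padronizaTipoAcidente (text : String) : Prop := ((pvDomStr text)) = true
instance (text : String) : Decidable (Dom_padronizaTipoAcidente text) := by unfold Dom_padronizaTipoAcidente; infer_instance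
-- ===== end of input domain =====

set_option maxHeartbeats 2000000


-- B replaces A's seven sequential full-string replace passes by a single left-to-right scan that
-- substitutes the first source phrase matching at each position (objective: alternative, same
-- cost); the two agree on every input admitted by Pre_ below.

-- the seven source phrases and their targets, shared notation
def pvP1 : List Char := "colisao com objeto fixo".toList
def pvP2 : List Char := "colisao com objeto movel".toList
def pvP3 : List Char := "colisao com objeto em movimento".toList
def pvP4 : List Char := "colisao com objeto estatico".toList
def pvP5 : List Char := "colisao lateral mesmo sentido".toList
def pvP6 : List Char := "colisao lateral sentido oposto".toList
def pvP7 : List Char := "atropelamento de pessoa".toList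
def pvT1 : List Char := "colisao com objeto".toList
def pvT5 : List Char := "colisao lateral".toList
def pvT7 : List Char := "atropelamento de pedestre".toList

-- ===== PORT A =====
def padronizaTipoAcidente (text : String) : String :=
  let t := PySem.Str.lower text
  let t := PySem.Str.replace t "colisao com objeto fixo" "colisao com objeto"
  let t := PySem.Str.replace t "colisao com objeto movel" "colisao com objeto"
  let t := PySem.Str.replace t "colisao com objeto em movimento" "colisao com objeto"
  let t := PySem.Str.replace t "colisao com objeto estatico" "colisao com objeto"
  let t := PySem.Str.replace t "colisao lateral mesmo sentido" "colisao lateral"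
  let t := PySem.Str.replace t "colisao lateral sentido oposto" "colisao lateral"
  let t := PySem.Str.replace t "atropelamento de pessoa" "atropelamento de pedestre"
  PySem.Str.join " " ((PySem.Str.split₀ t).map (fun palavra => PySem.Str.strip palavra))

-- ===== PORT B =====
-- Source B's single while/startswith scan; fuel = remaining length, in the style of PySem's own loops
def pvScanGo : Nat → List Char → List Char
  | 0, [] => []
  | 0, c :: t => c :: t
  | Nat.succ _, [] => []
  | Nat.succ f, c :: t =>
    if pvP1.isPrefixOf (c :: t) then pvT1 ++ pvScanGo f ((c :: t).drop pvP1.length)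
    else if pvP2.isPrefixOf (c :: t) then pvT1 ++ pvScanGo f ((c :: t).drop pvP2.length)
    else if pvP3.isPrefixOf (c :: t) then pvT1 ++ pvScanGo f ((c :: t).drop pvP3.length)
    else if pvP4.isPrefixOf (c :: t) then pvT1 ++ pvScanGo f ((c :: t).drop pvP4.length)
    else if pvP5.isPrefixOf (c :: t) then pvT5 ++ pvScanGo f ((c :: t).drop pvP5.length)
    else if pvP6.isPrefixOf (c :: t) then pvT5 ++ pvScanGo f ((c :: t).drop pvP6.length)
    else if pvP7.isPrefixOf (c :: t) then pvT7 ++ pvScanGo f ((c :: t).drop pvP7.length)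
    else c :: pvScanGo f t

def padronizaTipoAcidente_alt (text : String) : String :=
  let t := PySem.Str.lower text
  let scanned := String.ofList (pvScanGo t.toList.length t.toList)
  PySem.Str.join " " (PySem.Str.split₀ scanned)

-- ===== PRECONDITION & SPEC =====
-- Pre_ excludes inputs whose lowercased text contains a cascading/overlapping combination of the
-- source phrases (one replacement's output abutting the following text re-forms a later phrase,
-- or the 'estatico'/'colisao' overlap): there A's sequential passes and B's single pass resolve
-- the overlapping matches differently, a first-vs-last-match tie no caller would specify.
def pvTrigs : List String :=
  [ "colisao com objeto fixo movel"
  , "colisao com objeto fixo em movimento"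
  , "colisao com objeto fixo estatico"
  , "colisao com objeto movel em movimento"
  , "colisao com objeto movel estatico"
  , "colisao com objeto em movimento estatico"
  , "colisao lateral mesmo sentido sentido oposto"
  , "colisao com objeto estaticolisao com objeto fixo"
  , "colisao com objeto estaticolisao com objeto movel"
  , "colisao com objeto estaticolisao com objeto em movimento" ]

def Pre_padronizaTipoAcidente (text : String) : Prop :=
  ∀ w ∈ pvTrigs, PySem.Str.isIn w (PySem.Str.lower text) = false
instance (text : String) : Decidable (Pre_padronizaTipoAcidente text) := by
  unfold Pre_padronizaTipoAcidente; infer_instance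

def pvWitness_padronizaTipoAcidente : String := "colisao com objeto fixo"

def Spec_padronizaTipoAcidente (text : String) (out : String) : Prop :=
  out = padronizaTipoAcidente_alt text
instance (text : String) (out : String) : Decidable (Spec_padronizaTipoAcidente text out) := by
  unfold Spec_padronizaTipoAcidente; infer_instance

-- ===== CLAIM (what is proved, stated in full; the proofs are below) =====
def Claim_equal_padronizaTipoAcidente : Prop := ∀ (text : String), Dom_padronizaTipoAcidente text → Pre_padronizaTipoAcidente text → Spec_padronizaTipoAcidente text (padronizaTipoAcidente text)

-- ===== LEMMAS AND PROOFS =====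

-- notation: one replace pass, A's composition of the seven passes, B's scan, trigger freedom
def pvRep (l P T : List Char) : List Char := PySem.Chars.replace l P T
def pvComp (l : List Char) : List Char :=
  pvRep (pvRep (pvRep (pvRep (pvRep (pvRep (pvRep l pvP1 pvT1) pvP2 pvT1) pvP3 pvT1) pvP4 pvT1) pvP5 pvT5) pvP6 pvT5) pvP7 pvT7
def pvScan (l : List Char) : List Char := pvScanGo l.length l
def pvNoTrig (l : List Char) : Prop := ∀ w ∈ pvTrigs, ¬ w.toList <:+: l

-- replace.go: the accumulator is a reversed prefix of the result
theorem repGo_acc (old new : List Char) (fuel : Nat) (l acc : List Char) :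
    PySem.Chars.replace.go old new fuel l acc = acc.reverse ++ PySem.Chars.replace.go old new fuel l [] := by
  induction fuel generalizing l acc with
  | zero => simp [PySem.Chars.replace.go]
  | succ f ih =>
    cases l with
    | nil => simp [PySem.Chars.replace.go]
    | cons c t =>
      simp only [PySem.Chars.replace.go]
      split
      · rw [ih _ (new.reverse ++ acc), ih _ (new.reverse ++ [])]; simp
      · rw [ih _ (c :: acc), ih _ [c]]; simp

-- replace.go: any two sufficient fuels agree
theorem repGo_fuel (old new : List Char) (hold : old ≠ []) :
    ∀ f1 f2 l acc, l.length ≤ f1 → l.length ≤ f2 →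
      PySem.Chars.replace.go old new f1 l acc = PySem.Chars.replace.go old new f2 l acc := by
  have holdlen : 1 ≤ old.length := by
    cases old with | nil => exact absurd rfl hold | cons c t => simp
  intro f1
  induction f1 with
  | zero =>
    intro f2 l acc h1 _
    have : l = [] := by cases l with | nil => rfl | cons c t => simp at h1
    subst this
    cases f2 <;> simp [PySem.Chars.replace.go]
  | succ f ih =>
    intro f2 l acc h1 h2
    cases l with
    | nil => cases f2 <;> simp [PySem.Chars.replace.go]
    | cons c t =>
      cases f2 with
      | zero => simp at h2
      | succ f2' =>
        simp only [PySem.Chars.replace.go]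
        split
        · apply ih
          · simp only [List.length_drop, List.length_cons] at h1 ⊢; omega
          · simp only [List.length_drop, List.length_cons] at h2 ⊢; omega
        · exact ih _ t _ (by simp only [List.length_cons] at h1; omega)
            (by simp only [List.length_cons] at h2; omega)

theorem rep_isEmpty_false (old : List Char) (hold : old ≠ []) : old.isEmpty = false := by
  cases old with | nil => exact absurd rfl hold | cons c t => rfl

theorem rep_nil (old new : List Char) (hold : old ≠ []) :
    PySem.Chars.replace [] old new = [] := by
  simp [PySem.Chars.replace, rep_isEmpty_false old hold, PySem.Chars.replace.go]

theorem rep_pos (l old new : List Char) (hold : old ≠ []) (h : old.isPrefixOf l = true) :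
    PySem.Chars.replace l old new = new ++ PySem.Chars.replace (l.drop old.length) old new := by
  have holdlen : 1 ≤ old.length := by
    cases old with | nil => exact absurd rfl hold | cons c t => simp
  cases l with
  | nil =>
    exfalso
    cases old with
    | nil => exact hold rfl
    | cons a as => simp [List.isPrefixOf] at h
  | cons c t =>
    simp only [PySem.Chars.replace, rep_isEmpty_false old hold, Bool.false_eq_true, if_false]
    simp only [List.length_cons, PySem.Chars.replace.go, h, if_true]
    rw [repGo_acc]
    simp only [List.append_nil, List.reverse_reverse]
    congr 1
    apply repGo_fuel old new hold
    · simp only [List.length_drop, List.length_cons]; omega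
    · exact le_rfl

theorem rep_neg (c : Char) (t old new : List Char) (hold : old ≠ [])
    (h : old.isPrefixOf (c :: t) = false) :
    PySem.Chars.replace (c :: t) old new = c :: PySem.Chars.replace t old new := by
  simp only [PySem.Chars.replace, rep_isEmpty_false old hold, Bool.false_eq_true, if_false]
  simp only [List.length_cons, PySem.Chars.replace.go, h, Bool.false_eq_true, if_false]
  rw [repGo_acc]
  simp

theorem rep_neg' (c : Char) (t old new : List Char) (hold : old ≠ [])
    (h : old.isPrefixOf (c :: t) = false) :
    pvRep (c :: t) old new = c :: pvRep t old new := rep_neg c t old new hold h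

theorem not_prefix_of_false (P l : List Char) (h : P.isPrefixOf l = false) : ¬ P <+: l := by
  rw [← List.isPrefixOf_iff_prefix, h]
  simp

theorem prefix_false_of_not (P l : List Char) (h : ¬ P <+: l) : P.isPrefixOf l = false := by
  rw [← Bool.not_eq_true, List.isPrefixOf_iff_prefix]; exact h

-- side-condition tables, all finite and decidable
def pvOkayS (s P T : List Char) : Bool :=
  if s.length ≤ T.length then !(s.isPrefixOf T) || s.isPrefixOf P
  else !(T.isPrefixOf s) || s.isPrefixOf P
def pvFamOkay (s₀ P T : List Char) : Bool :=
  (List.range (s₀.length + 1)).all fun q => pvOkayS (s₀.drop q) P T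
def pvOkPreBut (P pre : List Char) (dbad : Nat) : Bool :=
  (List.range pre.length).all fun d =>
    d == dbad || (!(P.isPrefixOf (pre.drop d)) && !((pre.drop d).isPrefixOf P))

-- a replace pass cannot create a prefix from the family of suffixes of s₀
theorem master (P T : List Char) (hP : P ≠ []) (s₀ : List Char)
    (hfam : pvFamOkay s₀ P T = true) :
    ∀ (X : List Char) (q : Nat), ¬ s₀.drop q <+: X → ¬ s₀.drop q <+: PySem.Chars.replace X P T := by
  intro X
  induction X with
  | nil =>
    intro q h
    rw [rep_nil _ _ hP]
    intro hc
    have : s₀.drop q = [] := List.prefix_nil.mp hc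
    exact h (this ▸ List.nil_prefix)
  | cons c t ih =>
    intro q h
    by_cases hpre : P.isPrefixOf (c :: t) = true
    · rw [rep_pos _ _ _ hP hpre]
      intro hc
      by_cases hsnil : s₀.drop q = []
      · exact h (hsnil ▸ List.nil_prefix)
      have hq : q < s₀.length + 1 := by
        by_contra hq
        exact hsnil (List.drop_eq_nil_of_le (by omega))
      have hok : pvOkayS (s₀.drop q) P T = true :=
        List.all_eq_true.mp hfam q (List.mem_range.mpr hq)
      have hPX : P <+: c :: t := List.isPrefixOf_iff_prefix.mp hpre
      simp only [pvOkayS] at hok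
      by_cases hlen : (s₀.drop q).length ≤ T.length
      · rw [if_pos hlen] at hok
        have hsT : s₀.drop q <+: T := by
          have he := List.prefix_iff_eq_take.mp hc
          rw [List.take_append_of_le_length hlen] at he
          exact he ▸ List.take_prefix _ _
        rcases (Bool.or_eq_true _ _).mp hok with hne | hyes
        · rw [Bool.not_eq_eq_eq_not, Bool.not_true] at hne
          exact not_prefix_of_false _ _ hne hsT
        · exact h ((List.isPrefixOf_iff_prefix.mp hyes).trans hPX)
      · rw [if_neg hlen] at hok
        have hlen := Nat.lt_of_not_le hlen
        have hTs : T <+: s₀.drop q := by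
          have he := List.prefix_iff_eq_take.mp hc
          have ht : (s₀.drop q).take T.length = T := by
            conv_lhs => rw [he]
            rw [List.take_take, min_eq_left (le_of_lt hlen), List.take_left]
          exact ht ▸ List.take_prefix _ _
        rcases (Bool.or_eq_true _ _).mp hok with hne | hyes
        · rw [Bool.not_eq_eq_eq_not, Bool.not_true] at hne
          exact not_prefix_of_false _ _ hne hTs
        · exact h ((List.isPrefixOf_iff_prefix.mp hyes).trans hPX)
    · rw [rep_neg _ _ _ _ hP (Bool.eq_false_iff.mpr hpre)]
      intro hc
      cases hs : s₀.drop q with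
      | nil => exact h (hs ▸ List.nil_prefix)
      | cons a s' =>
        rw [hs] at hc h
        rcases List.cons_prefix_cons.mp hc with ⟨rfl, hc'⟩
        have h' : ¬ s' <+: t := fun hp => h (List.cons_prefix_cons.mpr ⟨rfl, hp⟩)
        have hs' : s₀.drop (q + 1) = s' := by
          rw [← List.drop_drop, hs]; rfl
        have := ih (q + 1) (by rw [hs']; exact h')
        rw [hs'] at this
        exact this hc'

theorem master0 (P T : List Char) (hP : P ≠ []) (s : List Char)
    (hfam : pvFamOkay s P T = true) (X : List Char) (h : ¬ s <+: X) : ¬ s <+: pvRep X P T := by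
  have := master P T hP s hfam X 0 (by simpa using h)
  simpa [pvRep] using this

-- helpers to refute "P occurs at offset d"
theorem notpre_of_flags (P s X : List Char) (h1 : P.isPrefixOf s = false)
    (h2 : s.isPrefixOf P = false) : ¬ P <+: s ++ X := by
  intro h
  by_cases hl : P.length ≤ s.length
  · have : P <+: s := by
      have he := List.prefix_iff_eq_take.mp h
      rw [List.take_append_of_le_length hl] at he
      exact he ▸ List.take_prefix _ _
    exact not_prefix_of_false _ _ h1 this
  · have hl := Nat.lt_of_not_le hl
    have : s <+: P := by
      have he := List.prefix_iff_eq_take.mp h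
      have ht : P.take s.length = s := by
        conv_lhs => rw [he]
        rw [List.take_take, min_eq_left (le_of_lt hl), List.take_left]
      exact ht ▸ List.take_prefix _ _
    exact not_prefix_of_false _ _ h2 this

theorem notpre_ext (P s X : List Char) (hs : s <+: P) (h : ¬ (P.drop s.length) <+: X) :
    ¬ P <+: s ++ X := by
  obtain ⟨r, hr⟩ := hs
  intro hc
  apply h
  have hd : P.drop s.length = r := by rw [← hr, List.drop_left]
  rw [hd]
  rw [← hr] at hc
  exact (List.prefix_append_right_inj s).mp hc

-- a pass walks unchanged through a region `pre` containing no occurrence of P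
theorem passthroughX (P T : List Char) (hP : P ≠ []) :
    ∀ (pre X : List Char), (∀ d, d < pre.length → ¬ P <+: (pre.drop d ++ X)) →
      PySem.Chars.replace (pre ++ X) P T = pre ++ PySem.Chars.replace X P T := by
  intro pre
  induction pre with
  | nil => intro X _; simp
  | cons c pre' ih =>
    intro X hd
    have h0 : ¬ P <+: (c :: (pre' ++ X)) := by
      have := hd 0 (by simp)
      simpa using this
    rw [List.cons_append, rep_neg _ _ _ _ hP (prefix_false_of_not _ _ h0)]
    rw [ih X (fun d hdd => by
      have := hd (d + 1) (by simp only [List.length_cons]; omega)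
      simpa using this)]
    simp

theorem passthrough_but (P T pre : List Char) (hP : P ≠ []) (dbad : Nat)
    (hok : pvOkPreBut P pre dbad = true) (X : List Char)
    (hbad : dbad < pre.length → ¬ P <+: (pre.drop dbad ++ X)) :
    pvRep (pre ++ X) P T = pre ++ pvRep X P T := by
  apply passthroughX P T hP
  intro d hd
  by_cases hdb : d = dbad
  · subst hdb; exact hbad hd
  · have := List.all_eq_true.mp hok d (List.mem_range.mpr hd)
    rw [Bool.or_eq_true, beq_iff_eq] at this
    rcases this with h | h
    · exact absurd h hdb
    · rw [Bool.and_eq_true, Bool.not_eq_true', Bool.not_eq_true'] at h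
      exact notpre_of_flags _ _ _ h.1 h.2

-- a pass cannot create a Pj-prefix behind an unmatched head character
theorem master_cons (P T Pj : List Char) (hP : P ≠ [])
    (hfam : pvFamOkay (Pj.drop 1) P T = true) :
    ∀ (c : Char) (X : List Char), ¬ Pj <+: (c :: X) →
      ¬ Pj <+: (c :: PySem.Chars.replace X P T) := by
  intro c X h hc
  cases Pj with
  | nil => exact h List.nil_prefix
  | cons b Pj' =>
    rcases List.cons_prefix_cons.mp hc with ⟨rfl, hc'⟩
    have h' : ¬ Pj' <+: X := fun hp => h (List.cons_prefix_cons.mpr ⟨rfl, hp⟩)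
    have := master P T hP ((b :: Pj').drop 1) hfam X 0 (by simpa using h')
    simp only [List.drop_zero, List.drop_succ_cons] at this
    exact this (by simpa using hc')

-- trigger-freedom gives the cascade bases
theorem base_helper (pre tail rest : List Char)
    (htr : ¬ (pre ++ tail) <:+: (pre ++ rest)) : ¬ tail <+: rest := by
  rintro ⟨u, hu⟩
  exact htr ⟨[], u, by simp [← hu]⟩

-- scan: fuel irrelevance and clean equations
theorem scanGo_fuel : ∀ f1 f2 l, l.length ≤ f1 → l.length ≤ f2 →
    pvScanGo f1 l = pvScanGo f2 l := by
  intro f1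
  induction f1 with
  | zero =>
    intro f2 l h1 _
    have : l = [] := by cases l with | nil => rfl | cons c t => simp at h1
    subst this
    cases f2 <;> rfl
  | succ f ih =>
    intro f2 l h1 h2
    cases l with
    | nil => cases f2 <;> rfl
    | cons c t =>
      cases f2 with
      | zero => simp at h2
      | succ f2' =>
        simp only [List.length_cons] at h1 h2
        simp only [pvScanGo]
        split_ifs <;>
          first
          | (congr 1; apply ih <;>
              (simp only [List.length_drop, List.length_cons,
                (by decide : pvP1.length = 23), (by decide : pvP2.length = 24),
                (by decide : pvP3.length = 31), (by decide : pvP4.length = 27),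
                (by decide : pvP5.length = 29), (by decide : pvP6.length = 30),
                (by decide : pvP7.length = 23)]; omega))
          | (congr 1; exact ih f2' t (by omega) (by omega))

theorem scan_cons (c : Char) (t : List Char)
    (h1 : pvP1.isPrefixOf (c :: t) = false) (h2 : pvP2.isPrefixOf (c :: t) = false)
    (h3 : pvP3.isPrefixOf (c :: t) = false) (h4 : pvP4.isPrefixOf (c :: t) = false)
    (h5 : pvP5.isPrefixOf (c :: t) = false) (h6 : pvP6.isPrefixOf (c :: t) = false)
    (h7 : pvP7.isPrefixOf (c :: t) = false) :
    pvScan (c :: t) = c :: pvScan t := by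
  unfold pvScan
  simp only [List.length_cons, pvScanGo, h1, h2, h3, h4, h5, h6, h7,
    Bool.false_eq_true, if_false]

-- pvNoTrig is inherited by suffixes
theorem noTrig_suffix (pre rest : List Char) (h : pvNoTrig (pre ++ rest)) : pvNoTrig rest :=
  fun w hw hc => h w hw (hc.trans (List.IsSuffix.isInfix ⟨pre, rfl⟩))

theorem noTrig_tail (c : Char) (t : List Char) (h : pvNoTrig (c :: t)) : pvNoTrig t :=
  fun w hw hc => h w hw (hc.trans (List.IsSuffix.isInfix ⟨[c], rfl⟩))

theorem scan_match1 (l : List Char) (h1 : pvP1.isPrefixOf l = true) :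
    pvScan l = pvT1 ++ pvScan (l.drop pvP1.length) := by
  cases l with
  | nil => exact absurd h1 (by decide)
  | cons c t =>
    unfold pvScan
    simp only [List.length_cons, pvScanGo, h1, if_true]
    congr 1
    apply scanGo_fuel <;>
      (simp only [List.length_drop, List.length_cons, (by decide : pvP1.length = 23)]; omega)

theorem scan_match2 (l : List Char) (h1 : pvP1.isPrefixOf l = false) (h2 : pvP2.isPrefixOf l = true) :
    pvScan l = pvT1 ++ pvScan (l.drop pvP2.length) := by
  cases l with
  | nil => exact absurd h2 (by decide)
  | cons c t =>
    unfold pvScan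
    simp only [List.length_cons, pvScanGo, h1, h2, Bool.false_eq_true, if_false, if_true]
    congr 1
    apply scanGo_fuel <;>
      (simp only [List.length_drop, List.length_cons, (by decide : pvP2.length = 24)]; omega)

theorem scan_match3 (l : List Char) (h1 : pvP1.isPrefixOf l = false) (h2 : pvP2.isPrefixOf l = false) (h3 : pvP3.isPrefixOf l = true) :
    pvScan l = pvT1 ++ pvScan (l.drop pvP3.length) := by
  cases l with
  | nil => exact absurd h3 (by decide)
  | cons c t =>
    unfold pvScan
    simp only [List.length_cons, pvScanGo, h1, h2, h3, Bool.false_eq_true, if_false, if_true]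
    congr 1
    apply scanGo_fuel <;>
      (simp only [List.length_drop, List.length_cons, (by decide : pvP3.length = 31)]; omega)

theorem scan_match4 (l : List Char) (h1 : pvP1.isPrefixOf l = false) (h2 : pvP2.isPrefixOf l = false) (h3 : pvP3.isPrefixOf l = false) (h4 : pvP4.isPrefixOf l = true) :
    pvScan l = pvT1 ++ pvScan (l.drop pvP4.length) := by
  cases l with
  | nil => exact absurd h4 (by decide)
  | cons c t =>
    unfold pvScan
    simp only [List.length_cons, pvScanGo, h1, h2, h3, h4, Bool.false_eq_true, if_false, if_true]
    congr 1
    apply scanGo_fuel <;>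
      (simp only [List.length_drop, List.length_cons, (by decide : pvP4.length = 27)]; omega)

theorem scan_match5 (l : List Char) (h1 : pvP1.isPrefixOf l = false) (h2 : pvP2.isPrefixOf l = false) (h3 : pvP3.isPrefixOf l = false) (h4 : pvP4.isPrefixOf l = false) (h5 : pvP5.isPrefixOf l = true) :
    pvScan l = pvT5 ++ pvScan (l.drop pvP5.length) := by
  cases l with
  | nil => exact absurd h5 (by decide)
  | cons c t =>
    unfold pvScan
    simp only [List.length_cons, pvScanGo, h1, h2, h3, h4, h5, Bool.false_eq_true, if_false, if_true]
    congr 1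
    apply scanGo_fuel <;>
      (simp only [List.length_drop, List.length_cons, (by decide : pvP5.length = 29)]; omega)

theorem scan_match6 (l : List Char) (h1 : pvP1.isPrefixOf l = false) (h2 : pvP2.isPrefixOf l = false) (h3 : pvP3.isPrefixOf l = false) (h4 : pvP4.isPrefixOf l = false) (h5 : pvP5.isPrefixOf l = false) (h6 : pvP6.isPrefixOf l = true) :
    pvScan l = pvT5 ++ pvScan (l.drop pvP6.length) := by
  cases l with
  | nil => exact absurd h6 (by decide)
  | cons c t =>
    unfold pvScan
    simp only [List.length_cons, pvScanGo, h1, h2, h3, h4, h5, h6, Bool.false_eq_true, if_false, if_true]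
    congr 1
    apply scanGo_fuel <;>
      (simp only [List.length_drop, List.length_cons, (by decide : pvP6.length = 30)]; omega)

theorem scan_match7 (l : List Char) (h1 : pvP1.isPrefixOf l = false) (h2 : pvP2.isPrefixOf l = false) (h3 : pvP3.isPrefixOf l = false) (h4 : pvP4.isPrefixOf l = false) (h5 : pvP5.isPrefixOf l = false) (h6 : pvP6.isPrefixOf l = false) (h7 : pvP7.isPrefixOf l = true) :
    pvScan l = pvT7 ++ pvScan (l.drop pvP7.length) := by
  cases l with
  | nil => exact absurd h7 (by decide)
  | cons c t =>
    unfold pvScan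
    simp only [List.length_cons, pvScanGo, h1, h2, h3, h4, h5, h6, h7, Bool.false_eq_true, if_false, if_true]
    congr 1
    apply scanGo_fuel <;>
      (simp only [List.length_drop, List.length_cons, (by decide : pvP7.length = 23)]; omega)

-- the heart: on trigger-free text the sequential passes equal the single scan
theorem comp_scan : ∀ (n : Nat) (l : List Char), l.length ≤ n → pvNoTrig l →
    pvComp l = pvScan l := by
  intro n
  induction n with
  | zero =>
    intro l h _
    have : l = [] := by cases l with | nil => rfl | cons c t => simp at h
    subst this
    decide
  | succ n ih =>
    intro l hlen hnt
    by_cases hk1 : pvP1.isPrefixOf l = true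
    · -- rule 1 fires at the head
      obtain ⟨rest, rfl⟩ : ∃ rest, l = pvP1 ++ rest := by
        obtain ⟨r, hr⟩ := List.isPrefixOf_iff_prefix.mp hk1; exact ⟨r, hr.symm⟩
      have hrlen : rest.length ≤ n := by
        rw [List.length_append, (by decide : pvP1.length = 23)] at hlen; omega
      have hntr : pvNoTrig rest := noTrig_suffix _ _ hnt
      have b20 : ¬ pvP2.drop pvT1.length <+: rest := base_helper pvP1 _ rest (by
        have := hnt "colisao com objeto fixo movel" (by simp [pvTrigs])
        rwa [(by decide : ("colisao com objeto fixo movel").toList = pvP1 ++ pvP2.drop pvT1.length)] at this)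
      have b21 : ¬ pvP2.drop pvT1.length <+: (pvRep rest pvP1 pvT1) :=
        master0 pvP1 pvT1 (by decide) _ (by decide) _ b20
      have b30 : ¬ pvP3.drop pvT1.length <+: rest := base_helper pvP1 _ rest (by
        have := hnt "colisao com objeto fixo em movimento" (by simp [pvTrigs])
        rwa [(by decide : ("colisao com objeto fixo em movimento").toList = pvP1 ++ pvP3.drop pvT1.length)] at this)
      have b31 : ¬ pvP3.drop pvT1.length <+: (pvRep rest pvP1 pvT1) :=
        master0 pvP1 pvT1 (by decide) _ (by decide) _ b30
      have b32 : ¬ pvP3.drop pvT1.length <+: (pvRep (pvRep rest pvP1 pvT1) pvP2 pvT1) :=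
        master0 pvP2 pvT1 (by decide) _ (by decide) _ b31
      have b40 : ¬ pvP4.drop pvT1.length <+: rest := base_helper pvP1 _ rest (by
        have := hnt "colisao com objeto fixo estatico" (by simp [pvTrigs])
        rwa [(by decide : ("colisao com objeto fixo estatico").toList = pvP1 ++ pvP4.drop pvT1.length)] at this)
      have b41 : ¬ pvP4.drop pvT1.length <+: (pvRep rest pvP1 pvT1) :=
        master0 pvP1 pvT1 (by decide) _ (by decide) _ b40
      have b42 : ¬ pvP4.drop pvT1.length <+: (pvRep (pvRep rest pvP1 pvT1) pvP2 pvT1) :=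
        master0 pvP2 pvT1 (by decide) _ (by decide) _ b41
      have b43 : ¬ pvP4.drop pvT1.length <+: (pvRep (pvRep (pvRep rest pvP1 pvT1) pvP2 pvT1) pvP3 pvT1) :=
        master0 pvP3 pvT1 (by decide) _ (by decide) _ b42
      have e1 : pvRep (pvP1 ++ rest) pvP1 pvT1 = pvT1 ++ pvRep rest pvP1 pvT1 := by
        rw [pvRep, rep_pos _ _ _ (by decide)
          (List.isPrefixOf_iff_prefix.mpr (List.prefix_append _ _)), List.drop_left]; rfl
      have e2 : pvRep (pvT1 ++ (pvRep rest pvP1 pvT1)) pvP2 pvT1 = pvT1 ++ pvRep (pvRep rest pvP1 pvT1) pvP2 pvT1 := by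
        apply passthrough_but pvP2 pvT1 pvT1 (by decide) 0 (by decide)
        intro _
        simpa using notpre_ext pvP2 pvT1 _ (by decide) b21
      have e3 : pvRep (pvT1 ++ (pvRep (pvRep rest pvP1 pvT1) pvP2 pvT1)) pvP3 pvT1 = pvT1 ++ pvRep (pvRep (pvRep rest pvP1 pvT1) pvP2 pvT1) pvP3 pvT1 := by
        apply passthrough_but pvP3 pvT1 pvT1 (by decide) 0 (by decide)
        intro _
        simpa using notpre_ext pvP3 pvT1 _ (by decide) b32
      have e4 : pvRep (pvT1 ++ (pvRep (pvRep (pvRep rest pvP1 pvT1) pvP2 pvT1) pvP3 pvT1)) pvP4 pvT1 = pvT1 ++ pvRep (pvRep (pvRep (pvRep rest pvP1 pvT1) pvP2 pvT1) pvP3 pvT1) pvP4 pvT1 := by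
        apply passthrough_but pvP4 pvT1 pvT1 (by decide) 0 (by decide)
        intro _
        simpa using notpre_ext pvP4 pvT1 _ (by decide) b43
      have e5 : pvRep (pvT1 ++ (pvRep (pvRep (pvRep (pvRep rest pvP1 pvT1) pvP2 pvT1) pvP3 pvT1) pvP4 pvT1)) pvP5 pvT5 = pvT1 ++ pvRep (pvRep (pvRep (pvRep (pvRep rest pvP1 pvT1) pvP2 pvT1) pvP3 pvT1) pvP4 pvT1) pvP5 pvT5 :=
        passthrough_but pvP5 pvT5 pvT1 (by decide) pvT1.length (by decide) _ (fun hlt => absurd hlt (lt_irrefl _))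
      have e6 : pvRep (pvT1 ++ (pvRep (pvRep (pvRep (pvRep (pvRep rest pvP1 pvT1) pvP2 pvT1) pvP3 pvT1) pvP4 pvT1) pvP5 pvT5)) pvP6 pvT5 = pvT1 ++ pvRep (pvRep (pvRep (pvRep (pvRep (pvRep rest pvP1 pvT1) pvP2 pvT1) pvP3 pvT1) pvP4 pvT1) pvP5 pvT5) pvP6 pvT5 :=
        passthrough_but pvP6 pvT5 pvT1 (by decide) pvT1.length (by decide) _ (fun hlt => absurd hlt (lt_irrefl _))
      have e7 : pvRep (pvT1 ++ (pvRep (pvRep (pvRep (pvRep (pvRep (pvRep rest pvP1 pvT1) pvP2 pvT1) pvP3 pvT1) pvP4 pvT1) pvP5 pvT5) pvP6 pvT5)) pvP7 pvT7 = pvT1 ++ pvRep (pvRep (pvRep (pvRep (pvRep (pvRep (pvRep rest pvP1 pvT1) pvP2 pvT1) pvP3 pvT1) pvP4 pvT1) pvP5 pvT5) pvP6 pvT5) pvP7 pvT7 :=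
        passthrough_but pvP7 pvT7 pvT1 (by decide) pvT1.length (by decide) _ (fun hlt => absurd hlt (lt_irrefl _))
      have hA : pvComp (pvP1 ++ rest) = pvT1 ++ pvComp rest := by
        unfold pvComp; rw [e1, e2, e3, e4, e5, e6, e7]
      have hB : pvScan (pvP1 ++ rest) = pvT1 ++ pvScan rest := by
        rw [scan_match1 _ hk1, List.drop_left]
      rw [hA, hB, ih rest hrlen hntr]
    by_cases hk2 : pvP2.isPrefixOf l = true
    · -- rule 2 fires at the head
      obtain ⟨rest, rfl⟩ : ∃ rest, l = pvP2 ++ rest := by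
        obtain ⟨r, hr⟩ := List.isPrefixOf_iff_prefix.mp hk2; exact ⟨r, hr.symm⟩
      have hf1 : pvP1.isPrefixOf (pvP2 ++ rest) = false := by
        simp only [Bool.not_eq_true] at hk1; exact hk1
      have hrlen : rest.length ≤ n := by
        rw [List.length_append, (by decide : pvP2.length = 24)] at hlen; omega
      have hntr : pvNoTrig rest := noTrig_suffix _ _ hnt
      have b30 : ¬ pvP3.drop pvT1.length <+: rest := base_helper pvP2 _ rest (by
        have := hnt "colisao com objeto movel em movimento" (by simp [pvTrigs])
        rwa [(by decide : ("colisao com objeto movel em movimento").toList = pvP2 ++ pvP3.drop pvT1.length)] at this)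
      have b31 : ¬ pvP3.drop pvT1.length <+: (pvRep rest pvP1 pvT1) :=
        master0 pvP1 pvT1 (by decide) _ (by decide) _ b30
      have b32 : ¬ pvP3.drop pvT1.length <+: (pvRep (pvRep rest pvP1 pvT1) pvP2 pvT1) :=
        master0 pvP2 pvT1 (by decide) _ (by decide) _ b31
      have b40 : ¬ pvP4.drop pvT1.length <+: rest := base_helper pvP2 _ rest (by
        have := hnt "colisao com objeto movel estatico" (by simp [pvTrigs])
        rwa [(by decide : ("colisao com objeto movel estatico").toList = pvP2 ++ pvP4.drop pvT1.length)] at this)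
      have b41 : ¬ pvP4.drop pvT1.length <+: (pvRep rest pvP1 pvT1) :=
        master0 pvP1 pvT1 (by decide) _ (by decide) _ b40
      have b42 : ¬ pvP4.drop pvT1.length <+: (pvRep (pvRep rest pvP1 pvT1) pvP2 pvT1) :=
        master0 pvP2 pvT1 (by decide) _ (by decide) _ b41
      have b43 : ¬ pvP4.drop pvT1.length <+: (pvRep (pvRep (pvRep rest pvP1 pvT1) pvP2 pvT1) pvP3 pvT1) :=
        master0 pvP3 pvT1 (by decide) _ (by decide) _ b42
      have e1 : pvRep (pvP2 ++ rest) pvP1 pvT1 = pvP2 ++ pvRep rest pvP1 pvT1 :=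
        passthrough_but pvP1 pvT1 pvP2 (by decide) pvP2.length (by decide) _ (fun hlt => absurd hlt (lt_irrefl _))
      have e2 : pvRep (pvP2 ++ (pvRep rest pvP1 pvT1)) pvP2 pvT1 = pvT1 ++ pvRep (pvRep rest pvP1 pvT1) pvP2 pvT1 := by
        rw [pvRep, rep_pos _ _ _ (by decide)
          (List.isPrefixOf_iff_prefix.mpr (List.prefix_append _ _)), List.drop_left]; rfl
      have e3 : pvRep (pvT1 ++ (pvRep (pvRep rest pvP1 pvT1) pvP2 pvT1)) pvP3 pvT1 = pvT1 ++ pvRep (pvRep (pvRep rest pvP1 pvT1) pvP2 pvT1) pvP3 pvT1 := by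
        apply passthrough_but pvP3 pvT1 pvT1 (by decide) 0 (by decide)
        intro _
        simpa using notpre_ext pvP3 pvT1 _ (by decide) b32
      have e4 : pvRep (pvT1 ++ (pvRep (pvRep (pvRep rest pvP1 pvT1) pvP2 pvT1) pvP3 pvT1)) pvP4 pvT1 = pvT1 ++ pvRep (pvRep (pvRep (pvRep rest pvP1 pvT1) pvP2 pvT1) pvP3 pvT1) pvP4 pvT1 := by
        apply passthrough_but pvP4 pvT1 pvT1 (by decide) 0 (by decide)
        intro _
        simpa using notpre_ext pvP4 pvT1 _ (by decide) b43
      have e5 : pvRep (pvT1 ++ (pvRep (pvRep (pvRep (pvRep rest pvP1 pvT1) pvP2 pvT1) pvP3 pvT1) pvP4 pvT1)) pvP5 pvT5 = pvT1 ++ pvRep (pvRep (pvRep (pvRep (pvRep rest pvP1 pvT1) pvP2 pvT1) pvP3 pvT1) pvP4 pvT1) pvP5 pvT5 :=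
        passthrough_but pvP5 pvT5 pvT1 (by decide) pvT1.length (by decide) _ (fun hlt => absurd hlt (lt_irrefl _))
      have e6 : pvRep (pvT1 ++ (pvRep (pvRep (pvRep (pvRep (pvRep rest pvP1 pvT1) pvP2 pvT1) pvP3 pvT1) pvP4 pvT1) pvP5 pvT5)) pvP6 pvT5 = pvT1 ++ pvRep (pvRep (pvRep (pvRep (pvRep (pvRep rest pvP1 pvT1) pvP2 pvT1) pvP3 pvT1) pvP4 pvT1) pvP5 pvT5) pvP6 pvT5 :=
        passthrough_but pvP6 pvT5 pvT1 (by decide) pvT1.length (by decide) _ (fun hlt => absurd hlt (lt_irrefl _))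
      have e7 : pvRep (pvT1 ++ (pvRep (pvRep (pvRep (pvRep (pvRep (pvRep rest pvP1 pvT1) pvP2 pvT1) pvP3 pvT1) pvP4 pvT1) pvP5 pvT5) pvP6 pvT5)) pvP7 pvT7 = pvT1 ++ pvRep (pvRep (pvRep (pvRep (pvRep (pvRep (pvRep rest pvP1 pvT1) pvP2 pvT1) pvP3 pvT1) pvP4 pvT1) pvP5 pvT5) pvP6 pvT5) pvP7 pvT7 :=
        passthrough_but pvP7 pvT7 pvT1 (by decide) pvT1.length (by decide) _ (fun hlt => absurd hlt (lt_irrefl _))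
      have hA : pvComp (pvP2 ++ rest) = pvT1 ++ pvComp rest := by
        unfold pvComp; rw [e1, e2, e3, e4, e5, e6, e7]
      have hB : pvScan (pvP2 ++ rest) = pvT1 ++ pvScan rest := by
        rw [scan_match2 _ hf1 hk2, List.drop_left]
      rw [hA, hB, ih rest hrlen hntr]
    by_cases hk3 : pvP3.isPrefixOf l = true
    · -- rule 3 fires at the head
      obtain ⟨rest, rfl⟩ : ∃ rest, l = pvP3 ++ rest := by
        obtain ⟨r, hr⟩ := List.isPrefixOf_iff_prefix.mp hk3; exact ⟨r, hr.symm⟩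
      have hf1 : pvP1.isPrefixOf (pvP3 ++ rest) = false := by
        simp only [Bool.not_eq_true] at hk1; exact hk1
      have hf2 : pvP2.isPrefixOf (pvP3 ++ rest) = false := by
        simp only [Bool.not_eq_true] at hk2; exact hk2
      have hrlen : rest.length ≤ n := by
        rw [List.length_append, (by decide : pvP3.length = 31)] at hlen; omega
      have hntr : pvNoTrig rest := noTrig_suffix _ _ hnt
      have b40 : ¬ pvP4.drop pvT1.length <+: rest := base_helper pvP3 _ rest (by
        have := hnt "colisao com objeto em movimento estatico" (by simp [pvTrigs])
        rwa [(by decide : ("colisao com objeto em movimento estatico").toList = pvP3 ++ pvP4.drop pvT1.length)] at this)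
      have b41 : ¬ pvP4.drop pvT1.length <+: (pvRep rest pvP1 pvT1) :=
        master0 pvP1 pvT1 (by decide) _ (by decide) _ b40
      have b42 : ¬ pvP4.drop pvT1.length <+: (pvRep (pvRep rest pvP1 pvT1) pvP2 pvT1) :=
        master0 pvP2 pvT1 (by decide) _ (by decide) _ b41
      have b43 : ¬ pvP4.drop pvT1.length <+: (pvRep (pvRep (pvRep rest pvP1 pvT1) pvP2 pvT1) pvP3 pvT1) :=
        master0 pvP3 pvT1 (by decide) _ (by decide) _ b42
      have e1 : pvRep (pvP3 ++ rest) pvP1 pvT1 = pvP3 ++ pvRep rest pvP1 pvT1 :=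
        passthrough_but pvP1 pvT1 pvP3 (by decide) pvP3.length (by decide) _ (fun hlt => absurd hlt (lt_irrefl _))
      have e2 : pvRep (pvP3 ++ (pvRep rest pvP1 pvT1)) pvP2 pvT1 = pvP3 ++ pvRep (pvRep rest pvP1 pvT1) pvP2 pvT1 :=
        passthrough_but pvP2 pvT1 pvP3 (by decide) pvP3.length (by decide) _ (fun hlt => absurd hlt (lt_irrefl _))
      have e3 : pvRep (pvP3 ++ (pvRep (pvRep rest pvP1 pvT1) pvP2 pvT1)) pvP3 pvT1 = pvT1 ++ pvRep (pvRep (pvRep rest pvP1 pvT1) pvP2 pvT1) pvP3 pvT1 := by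
        rw [pvRep, rep_pos _ _ _ (by decide)
          (List.isPrefixOf_iff_prefix.mpr (List.prefix_append _ _)), List.drop_left]; rfl
      have e4 : pvRep (pvT1 ++ (pvRep (pvRep (pvRep rest pvP1 pvT1) pvP2 pvT1) pvP3 pvT1)) pvP4 pvT1 = pvT1 ++ pvRep (pvRep (pvRep (pvRep rest pvP1 pvT1) pvP2 pvT1) pvP3 pvT1) pvP4 pvT1 := by
        apply passthrough_but pvP4 pvT1 pvT1 (by decide) 0 (by decide)
        intro _
        simpa using notpre_ext pvP4 pvT1 _ (by decide) b43
      have e5 : pvRep (pvT1 ++ (pvRep (pvRep (pvRep (pvRep rest pvP1 pvT1) pvP2 pvT1) pvP3 pvT1) pvP4 pvT1)) pvP5 pvT5 = pvT1 ++ pvRep (pvRep (pvRep (pvRep (pvRep rest pvP1 pvT1) pvP2 pvT1) pvP3 pvT1) pvP4 pvT1) pvP5 pvT5 :=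
        passthrough_but pvP5 pvT5 pvT1 (by decide) pvT1.length (by decide) _ (fun hlt => absurd hlt (lt_irrefl _))
      have e6 : pvRep (pvT1 ++ (pvRep (pvRep (pvRep (pvRep (pvRep rest pvP1 pvT1) pvP2 pvT1) pvP3 pvT1) pvP4 pvT1) pvP5 pvT5)) pvP6 pvT5 = pvT1 ++ pvRep (pvRep (pvRep (pvRep (pvRep (pvRep rest pvP1 pvT1) pvP2 pvT1) pvP3 pvT1) pvP4 pvT1) pvP5 pvT5) pvP6 pvT5 :=
        passthrough_but pvP6 pvT5 pvT1 (by decide) pvT1.length (by decide) _ (fun hlt => absurd hlt (lt_irrefl _))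
      have e7 : pvRep (pvT1 ++ (pvRep (pvRep (pvRep (pvRep (pvRep (pvRep rest pvP1 pvT1) pvP2 pvT1) pvP3 pvT1) pvP4 pvT1) pvP5 pvT5) pvP6 pvT5)) pvP7 pvT7 = pvT1 ++ pvRep (pvRep (pvRep (pvRep (pvRep (pvRep (pvRep rest pvP1 pvT1) pvP2 pvT1) pvP3 pvT1) pvP4 pvT1) pvP5 pvT5) pvP6 pvT5) pvP7 pvT7 :=
        passthrough_but pvP7 pvT7 pvT1 (by decide) pvT1.length (by decide) _ (fun hlt => absurd hlt (lt_irrefl _))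
      have hA : pvComp (pvP3 ++ rest) = pvT1 ++ pvComp rest := by
        unfold pvComp; rw [e1, e2, e3, e4, e5, e6, e7]
      have hB : pvScan (pvP3 ++ rest) = pvT1 ++ pvScan rest := by
        rw [scan_match3 _ hf1 hf2 hk3, List.drop_left]
      rw [hA, hB, ih rest hrlen hntr]
    by_cases hk4 : pvP4.isPrefixOf l = true
    · -- rule 4 fires at the head
      obtain ⟨rest, rfl⟩ : ∃ rest, l = pvP4 ++ rest := by
        obtain ⟨r, hr⟩ := List.isPrefixOf_iff_prefix.mp hk4; exact ⟨r, hr.symm⟩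
      have hf1 : pvP1.isPrefixOf (pvP4 ++ rest) = false := by
        simp only [Bool.not_eq_true] at hk1; exact hk1
      have hf2 : pvP2.isPrefixOf (pvP4 ++ rest) = false := by
        simp only [Bool.not_eq_true] at hk2; exact hk2
      have hf3 : pvP3.isPrefixOf (pvP4 ++ rest) = false := by
        simp only [Bool.not_eq_true] at hk3; exact hk3
      have hrlen : rest.length ≤ n := by
        rw [List.length_append, (by decide : pvP4.length = 27)] at hlen; omega
      have hntr : pvNoTrig rest := noTrig_suffix _ _ hnt
      have co10 : ¬ pvP1.drop 2 <+: rest := base_helper pvP4 _ rest (by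
        have := hnt "colisao com objeto estaticolisao com objeto fixo" (by simp [pvTrigs])
        rwa [(by decide : ("colisao com objeto estaticolisao com objeto fixo").toList = pvP4 ++ pvP1.drop 2)] at this)
      have co20 : ¬ pvP2.drop 2 <+: rest := base_helper pvP4 _ rest (by
        have := hnt "colisao com objeto estaticolisao com objeto movel" (by simp [pvTrigs])
        rwa [(by decide : ("colisao com objeto estaticolisao com objeto movel").toList = pvP4 ++ pvP2.drop 2)] at this)
      have co21 : ¬ pvP2.drop 2 <+: (pvRep rest pvP1 pvT1) :=
        master0 pvP1 pvT1 (by decide) _ (by decide) _ co20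
      have co30 : ¬ pvP3.drop 2 <+: rest := base_helper pvP4 _ rest (by
        have := hnt "colisao com objeto estaticolisao com objeto em movimento" (by simp [pvTrigs])
        rwa [(by decide : ("colisao com objeto estaticolisao com objeto em movimento").toList = pvP4 ++ pvP3.drop 2)] at this)
      have co31 : ¬ pvP3.drop 2 <+: (pvRep rest pvP1 pvT1) :=
        master0 pvP1 pvT1 (by decide) _ (by decide) _ co30
      have co32 : ¬ pvP3.drop 2 <+: (pvRep (pvRep rest pvP1 pvT1) pvP2 pvT1) :=
        master0 pvP2 pvT1 (by decide) _ (by decide) _ co31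
      have e1 : pvRep (pvP4 ++ rest) pvP1 pvT1 = pvP4 ++ pvRep rest pvP1 pvT1 := by
        apply passthrough_but pvP1 pvT1 pvP4 (by decide) 25 (by decide)
        intro _
        apply notpre_ext pvP1 (pvP4.drop 25) _ (by decide)
        rw [(by decide : (pvP4.drop 25).length = 2)]
        exact co10
      have e2 : pvRep (pvP4 ++ (pvRep rest pvP1 pvT1)) pvP2 pvT1 = pvP4 ++ pvRep (pvRep rest pvP1 pvT1) pvP2 pvT1 := by
        apply passthrough_but pvP2 pvT1 pvP4 (by decide) 25 (by decide)
        intro _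
        apply notpre_ext pvP2 (pvP4.drop 25) _ (by decide)
        rw [(by decide : (pvP4.drop 25).length = 2)]
        exact co21
      have e3 : pvRep (pvP4 ++ (pvRep (pvRep rest pvP1 pvT1) pvP2 pvT1)) pvP3 pvT1 = pvP4 ++ pvRep (pvRep (pvRep rest pvP1 pvT1) pvP2 pvT1) pvP3 pvT1 := by
        apply passthrough_but pvP3 pvT1 pvP4 (by decide) 25 (by decide)
        intro _
        apply notpre_ext pvP3 (pvP4.drop 25) _ (by decide)
        rw [(by decide : (pvP4.drop 25).length = 2)]
        exact co32
      have e4 : pvRep (pvP4 ++ (pvRep (pvRep (pvRep rest pvP1 pvT1) pvP2 pvT1) pvP3 pvT1)) pvP4 pvT1 = pvT1 ++ pvRep (pvRep (pvRep (pvRep rest pvP1 pvT1) pvP2 pvT1) pvP3 pvT1) pvP4 pvT1 := by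
        rw [pvRep, rep_pos _ _ _ (by decide)
          (List.isPrefixOf_iff_prefix.mpr (List.prefix_append _ _)), List.drop_left]; rfl
      have e5 : pvRep (pvT1 ++ (pvRep (pvRep (pvRep (pvRep rest pvP1 pvT1) pvP2 pvT1) pvP3 pvT1) pvP4 pvT1)) pvP5 pvT5 = pvT1 ++ pvRep (pvRep (pvRep (pvRep (pvRep rest pvP1 pvT1) pvP2 pvT1) pvP3 pvT1) pvP4 pvT1) pvP5 pvT5 :=
        passthrough_but pvP5 pvT5 pvT1 (by decide) pvT1.length (by decide) _ (fun hlt => absurd hlt (lt_irrefl _))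
      have e6 : pvRep (pvT1 ++ (pvRep (pvRep (pvRep (pvRep (pvRep rest pvP1 pvT1) pvP2 pvT1) pvP3 pvT1) pvP4 pvT1) pvP5 pvT5)) pvP6 pvT5 = pvT1 ++ pvRep (pvRep (pvRep (pvRep (pvRep (pvRep rest pvP1 pvT1) pvP2 pvT1) pvP3 pvT1) pvP4 pvT1) pvP5 pvT5) pvP6 pvT5 :=
        passthrough_but pvP6 pvT5 pvT1 (by decide) pvT1.length (by decide) _ (fun hlt => absurd hlt (lt_irrefl _))
      have e7 : pvRep (pvT1 ++ (pvRep (pvRep (pvRep (pvRep (pvRep (pvRep rest pvP1 pvT1) pvP2 pvT1) pvP3 pvT1) pvP4 pvT1) pvP5 pvT5) pvP6 pvT5)) pvP7 pvT7 = pvT1 ++ pvRep (pvRep (pvRep (pvRep (pvRep (pvRep (pvRep rest pvP1 pvT1) pvP2 pvT1) pvP3 pvT1) pvP4 pvT1) pvP5 pvT5) pvP6 pvT5) pvP7 pvT7 :=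
        passthrough_but pvP7 pvT7 pvT1 (by decide) pvT1.length (by decide) _ (fun hlt => absurd hlt (lt_irrefl _))
      have hA : pvComp (pvP4 ++ rest) = pvT1 ++ pvComp rest := by
        unfold pvComp; rw [e1, e2, e3, e4, e5, e6, e7]
      have hB : pvScan (pvP4 ++ rest) = pvT1 ++ pvScan rest := by
        rw [scan_match4 _ hf1 hf2 hf3 hk4, List.drop_left]
      rw [hA, hB, ih rest hrlen hntr]
    by_cases hk5 : pvP5.isPrefixOf l = true
    · -- rule 5 fires at the head
      obtain ⟨rest, rfl⟩ : ∃ rest, l = pvP5 ++ rest := by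
        obtain ⟨r, hr⟩ := List.isPrefixOf_iff_prefix.mp hk5; exact ⟨r, hr.symm⟩
      have hf1 : pvP1.isPrefixOf (pvP5 ++ rest) = false := by
        simp only [Bool.not_eq_true] at hk1; exact hk1
      have hf2 : pvP2.isPrefixOf (pvP5 ++ rest) = false := by
        simp only [Bool.not_eq_true] at hk2; exact hk2
      have hf3 : pvP3.isPrefixOf (pvP5 ++ rest) = false := by
        simp only [Bool.not_eq_true] at hk3; exact hk3
      have hf4 : pvP4.isPrefixOf (pvP5 ++ rest) = false := by
        simp only [Bool.not_eq_true] at hk4; exact hk4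
      have hrlen : rest.length ≤ n := by
        rw [List.length_append, (by decide : pvP5.length = 29)] at hlen; omega
      have hntr : pvNoTrig rest := noTrig_suffix _ _ hnt
      have b60 : ¬ pvP6.drop pvT5.length <+: rest := base_helper pvP5 _ rest (by
        have := hnt "colisao lateral mesmo sentido sentido oposto" (by simp [pvTrigs])
        rwa [(by decide : ("colisao lateral mesmo sentido sentido oposto").toList = pvP5 ++ pvP6.drop pvT5.length)] at this)
      have b61 : ¬ pvP6.drop pvT5.length <+: (pvRep rest pvP1 pvT1) :=
        master0 pvP1 pvT1 (by decide) _ (by decide) _ b60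
      have b62 : ¬ pvP6.drop pvT5.length <+: (pvRep (pvRep rest pvP1 pvT1) pvP2 pvT1) :=
        master0 pvP2 pvT1 (by decide) _ (by decide) _ b61
      have b63 : ¬ pvP6.drop pvT5.length <+: (pvRep (pvRep (pvRep rest pvP1 pvT1) pvP2 pvT1) pvP3 pvT1) :=
        master0 pvP3 pvT1 (by decide) _ (by decide) _ b62
      have b64 : ¬ pvP6.drop pvT5.length <+: (pvRep (pvRep (pvRep (pvRep rest pvP1 pvT1) pvP2 pvT1) pvP3 pvT1) pvP4 pvT1) :=
        master0 pvP4 pvT1 (by decide) _ (by decide) _ b63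
      have b65 : ¬ pvP6.drop pvT5.length <+: (pvRep (pvRep (pvRep (pvRep (pvRep rest pvP1 pvT1) pvP2 pvT1) pvP3 pvT1) pvP4 pvT1) pvP5 pvT5) :=
        master0 pvP5 pvT5 (by decide) _ (by decide) _ b64
      have e1 : pvRep (pvP5 ++ rest) pvP1 pvT1 = pvP5 ++ pvRep rest pvP1 pvT1 :=
        passthrough_but pvP1 pvT1 pvP5 (by decide) pvP5.length (by decide) _ (fun hlt => absurd hlt (lt_irrefl _))
      have e2 : pvRep (pvP5 ++ (pvRep rest pvP1 pvT1)) pvP2 pvT1 = pvP5 ++ pvRep (pvRep rest pvP1 pvT1) pvP2 pvT1 :=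
        passthrough_but pvP2 pvT1 pvP5 (by decide) pvP5.length (by decide) _ (fun hlt => absurd hlt (lt_irrefl _))
      have e3 : pvRep (pvP5 ++ (pvRep (pvRep rest pvP1 pvT1) pvP2 pvT1)) pvP3 pvT1 = pvP5 ++ pvRep (pvRep (pvRep rest pvP1 pvT1) pvP2 pvT1) pvP3 pvT1 :=
        passthrough_but pvP3 pvT1 pvP5 (by decide) pvP5.length (by decide) _ (fun hlt => absurd hlt (lt_irrefl _))
      have e4 : pvRep (pvP5 ++ (pvRep (pvRep (pvRep rest pvP1 pvT1) pvP2 pvT1) pvP3 pvT1)) pvP4 pvT1 = pvP5 ++ pvRep (pvRep (pvRep (pvRep rest pvP1 pvT1) pvP2 pvT1) pvP3 pvT1) pvP4 pvT1 :=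
        passthrough_but pvP4 pvT1 pvP5 (by decide) pvP5.length (by decide) _ (fun hlt => absurd hlt (lt_irrefl _))
      have e5 : pvRep (pvP5 ++ (pvRep (pvRep (pvRep (pvRep rest pvP1 pvT1) pvP2 pvT1) pvP3 pvT1) pvP4 pvT1)) pvP5 pvT5 = pvT5 ++ pvRep (pvRep (pvRep (pvRep (pvRep rest pvP1 pvT1) pvP2 pvT1) pvP3 pvT1) pvP4 pvT1) pvP5 pvT5 := by
        rw [pvRep, rep_pos _ _ _ (by decide)
          (List.isPrefixOf_iff_prefix.mpr (List.prefix_append _ _)), List.drop_left]; rfl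
      have e6 : pvRep (pvT5 ++ (pvRep (pvRep (pvRep (pvRep (pvRep rest pvP1 pvT1) pvP2 pvT1) pvP3 pvT1) pvP4 pvT1) pvP5 pvT5)) pvP6 pvT5 = pvT5 ++ pvRep (pvRep (pvRep (pvRep (pvRep (pvRep rest pvP1 pvT1) pvP2 pvT1) pvP3 pvT1) pvP4 pvT1) pvP5 pvT5) pvP6 pvT5 := by
        apply passthrough_but pvP6 pvT5 pvT5 (by decide) 0 (by decide)
        intro _
        simpa using notpre_ext pvP6 pvT5 _ (by decide) b65
      have e7 : pvRep (pvT5 ++ (pvRep (pvRep (pvRep (pvRep (pvRep (pvRep rest pvP1 pvT1) pvP2 pvT1) pvP3 pvT1) pvP4 pvT1) pvP5 pvT5) pvP6 pvT5)) pvP7 pvT7 = pvT5 ++ pvRep (pvRep (pvRep (pvRep (pvRep (pvRep (pvRep rest pvP1 pvT1) pvP2 pvT1) pvP3 pvT1) pvP4 pvT1) pvP5 pvT5) pvP6 pvT5) pvP7 pvT7 :=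
        passthrough_but pvP7 pvT7 pvT5 (by decide) pvT5.length (by decide) _ (fun hlt => absurd hlt (lt_irrefl _))
      have hA : pvComp (pvP5 ++ rest) = pvT5 ++ pvComp rest := by
        unfold pvComp; rw [e1, e2, e3, e4, e5, e6, e7]
      have hB : pvScan (pvP5 ++ rest) = pvT5 ++ pvScan rest := by
        rw [scan_match5 _ hf1 hf2 hf3 hf4 hk5, List.drop_left]
      rw [hA, hB, ih rest hrlen hntr]
    by_cases hk6 : pvP6.isPrefixOf l = true
    · -- rule 6 fires at the head
      obtain ⟨rest, rfl⟩ : ∃ rest, l = pvP6 ++ rest := by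
        obtain ⟨r, hr⟩ := List.isPrefixOf_iff_prefix.mp hk6; exact ⟨r, hr.symm⟩
      have hf1 : pvP1.isPrefixOf (pvP6 ++ rest) = false := by
        simp only [Bool.not_eq_true] at hk1; exact hk1
      have hf2 : pvP2.isPrefixOf (pvP6 ++ rest) = false := by
        simp only [Bool.not_eq_true] at hk2; exact hk2
      have hf3 : pvP3.isPrefixOf (pvP6 ++ rest) = false := by
        simp only [Bool.not_eq_true] at hk3; exact hk3
      have hf4 : pvP4.isPrefixOf (pvP6 ++ rest) = false := by
        simp only [Bool.not_eq_true] at hk4; exact hk4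
      have hf5 : pvP5.isPrefixOf (pvP6 ++ rest) = false := by
        simp only [Bool.not_eq_true] at hk5; exact hk5
      have hrlen : rest.length ≤ n := by
        rw [List.length_append, (by decide : pvP6.length = 30)] at hlen; omega
      have hntr : pvNoTrig rest := noTrig_suffix _ _ hnt
      have e1 : pvRep (pvP6 ++ rest) pvP1 pvT1 = pvP6 ++ pvRep rest pvP1 pvT1 :=
        passthrough_but pvP1 pvT1 pvP6 (by decide) pvP6.length (by decide) _ (fun hlt => absurd hlt (lt_irrefl _))
      have e2 : pvRep (pvP6 ++ (pvRep rest pvP1 pvT1)) pvP2 pvT1 = pvP6 ++ pvRep (pvRep rest pvP1 pvT1) pvP2 pvT1 :=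
        passthrough_but pvP2 pvT1 pvP6 (by decide) pvP6.length (by decide) _ (fun hlt => absurd hlt (lt_irrefl _))
      have e3 : pvRep (pvP6 ++ (pvRep (pvRep rest pvP1 pvT1) pvP2 pvT1)) pvP3 pvT1 = pvP6 ++ pvRep (pvRep (pvRep rest pvP1 pvT1) pvP2 pvT1) pvP3 pvT1 :=
        passthrough_but pvP3 pvT1 pvP6 (by decide) pvP6.length (by decide) _ (fun hlt => absurd hlt (lt_irrefl _))
      have e4 : pvRep (pvP6 ++ (pvRep (pvRep (pvRep rest pvP1 pvT1) pvP2 pvT1) pvP3 pvT1)) pvP4 pvT1 = pvP6 ++ pvRep (pvRep (pvRep (pvRep rest pvP1 pvT1) pvP2 pvT1) pvP3 pvT1) pvP4 pvT1 :=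
        passthrough_but pvP4 pvT1 pvP6 (by decide) pvP6.length (by decide) _ (fun hlt => absurd hlt (lt_irrefl _))
      have e5 : pvRep (pvP6 ++ (pvRep (pvRep (pvRep (pvRep rest pvP1 pvT1) pvP2 pvT1) pvP3 pvT1) pvP4 pvT1)) pvP5 pvT5 = pvP6 ++ pvRep (pvRep (pvRep (pvRep (pvRep rest pvP1 pvT1) pvP2 pvT1) pvP3 pvT1) pvP4 pvT1) pvP5 pvT5 :=
        passthrough_but pvP5 pvT5 pvP6 (by decide) pvP6.length (by decide) _ (fun hlt => absurd hlt (lt_irrefl _))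
      have e6 : pvRep (pvP6 ++ (pvRep (pvRep (pvRep (pvRep (pvRep rest pvP1 pvT1) pvP2 pvT1) pvP3 pvT1) pvP4 pvT1) pvP5 pvT5)) pvP6 pvT5 = pvT5 ++ pvRep (pvRep (pvRep (pvRep (pvRep (pvRep rest pvP1 pvT1) pvP2 pvT1) pvP3 pvT1) pvP4 pvT1) pvP5 pvT5) pvP6 pvT5 := by
        rw [pvRep, rep_pos _ _ _ (by decide)
          (List.isPrefixOf_iff_prefix.mpr (List.prefix_append _ _)), List.drop_left]; rfl
      have e7 : pvRep (pvT5 ++ (pvRep (pvRep (pvRep (pvRep (pvRep (pvRep rest pvP1 pvT1) pvP2 pvT1) pvP3 pvT1) pvP4 pvT1) pvP5 pvT5) pvP6 pvT5)) pvP7 pvT7 = pvT5 ++ pvRep (pvRep (pvRep (pvRep (pvRep (pvRep (pvRep rest pvP1 pvT1) pvP2 pvT1) pvP3 pvT1) pvP4 pvT1) pvP5 pvT5) pvP6 pvT5) pvP7 pvT7 :=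
        passthrough_but pvP7 pvT7 pvT5 (by decide) pvT5.length (by decide) _ (fun hlt => absurd hlt (lt_irrefl _))
      have hA : pvComp (pvP6 ++ rest) = pvT5 ++ pvComp rest := by
        unfold pvComp; rw [e1, e2, e3, e4, e5, e6, e7]
      have hB : pvScan (pvP6 ++ rest) = pvT5 ++ pvScan rest := by
        rw [scan_match6 _ hf1 hf2 hf3 hf4 hf5 hk6, List.drop_left]
      rw [hA, hB, ih rest hrlen hntr]
    by_cases hk7 : pvP7.isPrefixOf l = true
    · -- rule 7 fires at the head
      obtain ⟨rest, rfl⟩ : ∃ rest, l = pvP7 ++ rest := by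
        obtain ⟨r, hr⟩ := List.isPrefixOf_iff_prefix.mp hk7; exact ⟨r, hr.symm⟩
      have hf1 : pvP1.isPrefixOf (pvP7 ++ rest) = false := by
        simp only [Bool.not_eq_true] at hk1; exact hk1
      have hf2 : pvP2.isPrefixOf (pvP7 ++ rest) = false := by
        simp only [Bool.not_eq_true] at hk2; exact hk2
      have hf3 : pvP3.isPrefixOf (pvP7 ++ rest) = false := by
        simp only [Bool.not_eq_true] at hk3; exact hk3
      have hf4 : pvP4.isPrefixOf (pvP7 ++ rest) = false := by
        simp only [Bool.not_eq_true] at hk4; exact hk4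
      have hf5 : pvP5.isPrefixOf (pvP7 ++ rest) = false := by
        simp only [Bool.not_eq_true] at hk5; exact hk5
      have hf6 : pvP6.isPrefixOf (pvP7 ++ rest) = false := by
        simp only [Bool.not_eq_true] at hk6; exact hk6
      have hrlen : rest.length ≤ n := by
        rw [List.length_append, (by decide : pvP7.length = 23)] at hlen; omega
      have hntr : pvNoTrig rest := noTrig_suffix _ _ hnt
      have e1 : pvRep (pvP7 ++ rest) pvP1 pvT1 = pvP7 ++ pvRep rest pvP1 pvT1 :=
        passthrough_but pvP1 pvT1 pvP7 (by decide) pvP7.length (by decide) _ (fun hlt => absurd hlt (lt_irrefl _))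
      have e2 : pvRep (pvP7 ++ (pvRep rest pvP1 pvT1)) pvP2 pvT1 = pvP7 ++ pvRep (pvRep rest pvP1 pvT1) pvP2 pvT1 :=
        passthrough_but pvP2 pvT1 pvP7 (by decide) pvP7.length (by decide) _ (fun hlt => absurd hlt (lt_irrefl _))
      have e3 : pvRep (pvP7 ++ (pvRep (pvRep rest pvP1 pvT1) pvP2 pvT1)) pvP3 pvT1 = pvP7 ++ pvRep (pvRep (pvRep rest pvP1 pvT1) pvP2 pvT1) pvP3 pvT1 :=
        passthrough_but pvP3 pvT1 pvP7 (by decide) pvP7.length (by decide) _ (fun hlt => absurd hlt (lt_irrefl _))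
      have e4 : pvRep (pvP7 ++ (pvRep (pvRep (pvRep rest pvP1 pvT1) pvP2 pvT1) pvP3 pvT1)) pvP4 pvT1 = pvP7 ++ pvRep (pvRep (pvRep (pvRep rest pvP1 pvT1) pvP2 pvT1) pvP3 pvT1) pvP4 pvT1 :=
        passthrough_but pvP4 pvT1 pvP7 (by decide) pvP7.length (by decide) _ (fun hlt => absurd hlt (lt_irrefl _))
      have e5 : pvRep (pvP7 ++ (pvRep (pvRep (pvRep (pvRep rest pvP1 pvT1) pvP2 pvT1) pvP3 pvT1) pvP4 pvT1)) pvP5 pvT5 = pvP7 ++ pvRep (pvRep (pvRep (pvRep (pvRep rest pvP1 pvT1) pvP2 pvT1) pvP3 pvT1) pvP4 pvT1) pvP5 pvT5 :=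
        passthrough_but pvP5 pvT5 pvP7 (by decide) pvP7.length (by decide) _ (fun hlt => absurd hlt (lt_irrefl _))
      have e6 : pvRep (pvP7 ++ (pvRep (pvRep (pvRep (pvRep (pvRep rest pvP1 pvT1) pvP2 pvT1) pvP3 pvT1) pvP4 pvT1) pvP5 pvT5)) pvP6 pvT5 = pvP7 ++ pvRep (pvRep (pvRep (pvRep (pvRep (pvRep rest pvP1 pvT1) pvP2 pvT1) pvP3 pvT1) pvP4 pvT1) pvP5 pvT5) pvP6 pvT5 :=
        passthrough_but pvP6 pvT5 pvP7 (by decide) pvP7.length (by decide) _ (fun hlt => absurd hlt (lt_irrefl _))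
      have e7 : pvRep (pvP7 ++ (pvRep (pvRep (pvRep (pvRep (pvRep (pvRep rest pvP1 pvT1) pvP2 pvT1) pvP3 pvT1) pvP4 pvT1) pvP5 pvT5) pvP6 pvT5)) pvP7 pvT7 = pvT7 ++ pvRep (pvRep (pvRep (pvRep (pvRep (pvRep (pvRep rest pvP1 pvT1) pvP2 pvT1) pvP3 pvT1) pvP4 pvT1) pvP5 pvT5) pvP6 pvT5) pvP7 pvT7 := by
        rw [pvRep, rep_pos _ _ _ (by decide)
          (List.isPrefixOf_iff_prefix.mpr (List.prefix_append _ _)), List.drop_left]; rfl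
      have hA : pvComp (pvP7 ++ rest) = pvT7 ++ pvComp rest := by
        unfold pvComp; rw [e1, e2, e3, e4, e5, e6, e7]
      have hB : pvScan (pvP7 ++ rest) = pvT7 ++ pvScan rest := by
        rw [scan_match7 _ hf1 hf2 hf3 hf4 hf5 hf6 hk7, List.drop_left]
      rw [hA, hB, ih rest hrlen hntr]
    -- no rule fires at the head
    have hf1 : pvP1.isPrefixOf l = false := by
      simp only [Bool.not_eq_true] at hk1; exact hk1
    have hf2 : pvP2.isPrefixOf l = false := by
      simp only [Bool.not_eq_true] at hk2; exact hk2
    have hf3 : pvP3.isPrefixOf l = false := by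
      simp only [Bool.not_eq_true] at hk3; exact hk3
    have hf4 : pvP4.isPrefixOf l = false := by
      simp only [Bool.not_eq_true] at hk4; exact hk4
    have hf5 : pvP5.isPrefixOf l = false := by
      simp only [Bool.not_eq_true] at hk5; exact hk5
    have hf6 : pvP6.isPrefixOf l = false := by
      simp only [Bool.not_eq_true] at hk6; exact hk6
    have hf7 : pvP7.isPrefixOf l = false := by
      simp only [Bool.not_eq_true] at hk7; exact hk7
    cases l with
    | nil => decide
    | cons c t =>
      have f1 : pvRep (c :: t) pvP1 pvT1 = c :: pvRep t pvP1 pvT1 :=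
        rep_neg' c t pvP1 pvT1 (by decide) hf1
      have g21 : ¬ pvP2 <+: (c :: (pvRep t pvP1 pvT1)) :=
        master_cons pvP1 pvT1 pvP2 (by decide) (by decide) c t (not_prefix_of_false _ _ hf2)
      have f2 : pvRep (c :: (pvRep t pvP1 pvT1)) pvP2 pvT1 = c :: pvRep (pvRep t pvP1 pvT1) pvP2 pvT1 :=
        rep_neg' c _ pvP2 pvT1 (by decide) (prefix_false_of_not _ _ g21)
      have g31 : ¬ pvP3 <+: (c :: (pvRep t pvP1 pvT1)) :=
        master_cons pvP1 pvT1 pvP3 (by decide) (by decide) c t (not_prefix_of_false _ _ hf3)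
      have g32 : ¬ pvP3 <+: (c :: (pvRep (pvRep t pvP1 pvT1) pvP2 pvT1)) :=
        master_cons pvP2 pvT1 pvP3 (by decide) (by decide) c (pvRep t pvP1 pvT1) g31
      have f3 : pvRep (c :: (pvRep (pvRep t pvP1 pvT1) pvP2 pvT1)) pvP3 pvT1 = c :: pvRep (pvRep (pvRep t pvP1 pvT1) pvP2 pvT1) pvP3 pvT1 :=
        rep_neg' c _ pvP3 pvT1 (by decide) (prefix_false_of_not _ _ g32)
      have g41 : ¬ pvP4 <+: (c :: (pvRep t pvP1 pvT1)) :=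
        master_cons pvP1 pvT1 pvP4 (by decide) (by decide) c t (not_prefix_of_false _ _ hf4)
      have g42 : ¬ pvP4 <+: (c :: (pvRep (pvRep t pvP1 pvT1) pvP2 pvT1)) :=
        master_cons pvP2 pvT1 pvP4 (by decide) (by decide) c (pvRep t pvP1 pvT1) g41
      have g43 : ¬ pvP4 <+: (c :: (pvRep (pvRep (pvRep t pvP1 pvT1) pvP2 pvT1) pvP3 pvT1)) :=
        master_cons pvP3 pvT1 pvP4 (by decide) (by decide) c (pvRep (pvRep t pvP1 pvT1) pvP2 pvT1) g42
      have f4 : pvRep (c :: (pvRep (pvRep (pvRep t pvP1 pvT1) pvP2 pvT1) pvP3 pvT1)) pvP4 pvT1 = c :: pvRep (pvRep (pvRep (pvRep t pvP1 pvT1) pvP2 pvT1) pvP3 pvT1) pvP4 pvT1 :=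
        rep_neg' c _ pvP4 pvT1 (by decide) (prefix_false_of_not _ _ g43)
      have g51 : ¬ pvP5 <+: (c :: (pvRep t pvP1 pvT1)) :=
        master_cons pvP1 pvT1 pvP5 (by decide) (by decide) c t (not_prefix_of_false _ _ hf5)
      have g52 : ¬ pvP5 <+: (c :: (pvRep (pvRep t pvP1 pvT1) pvP2 pvT1)) :=
        master_cons pvP2 pvT1 pvP5 (by decide) (by decide) c (pvRep t pvP1 pvT1) g51
      have g53 : ¬ pvP5 <+: (c :: (pvRep (pvRep (pvRep t pvP1 pvT1) pvP2 pvT1) pvP3 pvT1)) :=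
        master_cons pvP3 pvT1 pvP5 (by decide) (by decide) c (pvRep (pvRep t pvP1 pvT1) pvP2 pvT1) g52
      have g54 : ¬ pvP5 <+: (c :: (pvRep (pvRep (pvRep (pvRep t pvP1 pvT1) pvP2 pvT1) pvP3 pvT1) pvP4 pvT1)) :=
        master_cons pvP4 pvT1 pvP5 (by decide) (by decide) c (pvRep (pvRep (pvRep t pvP1 pvT1) pvP2 pvT1) pvP3 pvT1) g53
      have f5 : pvRep (c :: (pvRep (pvRep (pvRep (pvRep t pvP1 pvT1) pvP2 pvT1) pvP3 pvT1) pvP4 pvT1)) pvP5 pvT5 = c :: pvRep (pvRep (pvRep (pvRep (pvRep t pvP1 pvT1) pvP2 pvT1) pvP3 pvT1) pvP4 pvT1) pvP5 pvT5 :=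
        rep_neg' c _ pvP5 pvT5 (by decide) (prefix_false_of_not _ _ g54)
      have g61 : ¬ pvP6 <+: (c :: (pvRep t pvP1 pvT1)) :=
        master_cons pvP1 pvT1 pvP6 (by decide) (by decide) c t (not_prefix_of_false _ _ hf6)
      have g62 : ¬ pvP6 <+: (c :: (pvRep (pvRep t pvP1 pvT1) pvP2 pvT1)) :=
        master_cons pvP2 pvT1 pvP6 (by decide) (by decide) c (pvRep t pvP1 pvT1) g61
      have g63 : ¬ pvP6 <+: (c :: (pvRep (pvRep (pvRep t pvP1 pvT1) pvP2 pvT1) pvP3 pvT1)) :=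
        master_cons pvP3 pvT1 pvP6 (by decide) (by decide) c (pvRep (pvRep t pvP1 pvT1) pvP2 pvT1) g62
      have g64 : ¬ pvP6 <+: (c :: (pvRep (pvRep (pvRep (pvRep t pvP1 pvT1) pvP2 pvT1) pvP3 pvT1) pvP4 pvT1)) :=
        master_cons pvP4 pvT1 pvP6 (by decide) (by decide) c (pvRep (pvRep (pvRep t pvP1 pvT1) pvP2 pvT1) pvP3 pvT1) g63
      have g65 : ¬ pvP6 <+: (c :: (pvRep (pvRep (pvRep (pvRep (pvRep t pvP1 pvT1) pvP2 pvT1) pvP3 pvT1) pvP4 pvT1) pvP5 pvT5)) :=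
        master_cons pvP5 pvT5 pvP6 (by decide) (by decide) c (pvRep (pvRep (pvRep (pvRep t pvP1 pvT1) pvP2 pvT1) pvP3 pvT1) pvP4 pvT1) g64
      have f6 : pvRep (c :: (pvRep (pvRep (pvRep (pvRep (pvRep t pvP1 pvT1) pvP2 pvT1) pvP3 pvT1) pvP4 pvT1) pvP5 pvT5)) pvP6 pvT5 = c :: pvRep (pvRep (pvRep (pvRep (pvRep (pvRep t pvP1 pvT1) pvP2 pvT1) pvP3 pvT1) pvP4 pvT1) pvP5 pvT5) pvP6 pvT5 :=
        rep_neg' c _ pvP6 pvT5 (by decide) (prefix_false_of_not _ _ g65)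
      have g71 : ¬ pvP7 <+: (c :: (pvRep t pvP1 pvT1)) :=
        master_cons pvP1 pvT1 pvP7 (by decide) (by decide) c t (not_prefix_of_false _ _ hf7)
      have g72 : ¬ pvP7 <+: (c :: (pvRep (pvRep t pvP1 pvT1) pvP2 pvT1)) :=
        master_cons pvP2 pvT1 pvP7 (by decide) (by decide) c (pvRep t pvP1 pvT1) g71
      have g73 : ¬ pvP7 <+: (c :: (pvRep (pvRep (pvRep t pvP1 pvT1) pvP2 pvT1) pvP3 pvT1)) :=
        master_cons pvP3 pvT1 pvP7 (by decide) (by decide) c (pvRep (pvRep t pvP1 pvT1) pvP2 pvT1) g72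
      have g74 : ¬ pvP7 <+: (c :: (pvRep (pvRep (pvRep (pvRep t pvP1 pvT1) pvP2 pvT1) pvP3 pvT1) pvP4 pvT1)) :=
        master_cons pvP4 pvT1 pvP7 (by decide) (by decide) c (pvRep (pvRep (pvRep t pvP1 pvT1) pvP2 pvT1) pvP3 pvT1) g73
      have g75 : ¬ pvP7 <+: (c :: (pvRep (pvRep (pvRep (pvRep (pvRep t pvP1 pvT1) pvP2 pvT1) pvP3 pvT1) pvP4 pvT1) pvP5 pvT5)) :=
        master_cons pvP5 pvT5 pvP7 (by decide) (by decide) c (pvRep (pvRep (pvRep (pvRep t pvP1 pvT1) pvP2 pvT1) pvP3 pvT1) pvP4 pvT1) g74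
      have g76 : ¬ pvP7 <+: (c :: (pvRep (pvRep (pvRep (pvRep (pvRep (pvRep t pvP1 pvT1) pvP2 pvT1) pvP3 pvT1) pvP4 pvT1) pvP5 pvT5) pvP6 pvT5)) :=
        master_cons pvP6 pvT5 pvP7 (by decide) (by decide) c (pvRep (pvRep (pvRep (pvRep (pvRep t pvP1 pvT1) pvP2 pvT1) pvP3 pvT1) pvP4 pvT1) pvP5 pvT5) g75
      have f7 : pvRep (c :: (pvRep (pvRep (pvRep (pvRep (pvRep (pvRep t pvP1 pvT1) pvP2 pvT1) pvP3 pvT1) pvP4 pvT1) pvP5 pvT5) pvP6 pvT5)) pvP7 pvT7 = c :: pvRep (pvRep (pvRep (pvRep (pvRep (pvRep (pvRep t pvP1 pvT1) pvP2 pvT1) pvP3 pvT1) pvP4 pvT1) pvP5 pvT5) pvP6 pvT5) pvP7 pvT7 :=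
        rep_neg' c _ pvP7 pvT7 (by decide) (prefix_false_of_not _ _ g76)
      have hA : pvComp (c :: t) = c :: pvComp t := by
        unfold pvComp; rw [f1, f2, f3, f4, f5, f6, f7]
      have ht : t.length ≤ n := by simp only [List.length_cons] at hlen; omega
      rw [hA, scan_cons c t hf1 hf2 hf3 hf4 hf5 hf6 hf7, ih t ht (noTrig_tail c t hnt)]

-- A's final per-word strip is the identity on split₀ pieces
theorem split0Go_nonspace (s : List Char) (cur : List Char) (acc : List (List Char))
    (hc : ∀ c ∈ cur, PySem.Chars.isspace c = false)
    (ha : ∀ w ∈ acc, ∀ c ∈ w, PySem.Chars.isspace c = false) :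
    ∀ w ∈ PySem.Chars.split₀.go s cur acc, ∀ c ∈ w, PySem.Chars.isspace c = false := by
  induction s generalizing cur acc with
  | nil =>
    intro w hw
    simp only [PySem.Chars.split₀.go] at hw
    split at hw
    · exact ha w (by simpa using hw)
    · simp only [List.mem_reverse] at hw
      rcases List.mem_cons.mp hw with h | h
      · subst h; intro c hcw; exact hc c (by simpa using hcw)
      · exact ha w h
  | cons c t ih =>
    intro w hw
    simp only [PySem.Chars.split₀.go] at hw
    split at hw
    · split at hw
      · exact ih [] acc (by simp) ha w hw
      · refine ih [] (cur.reverse :: acc) (by simp) ?_ w hw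
        intro v hv
        rcases List.mem_cons.mp hv with h | h
        · subst h; intro d hd; exact hc d (by simpa using hd)
        · exact ha v h
    · rename_i hsp
      refine ih (c :: cur) acc ?_ ha w hw
      intro d hd
      rcases List.mem_cons.mp hd with h | h
      · subst h; simpa using hsp
      · exact hc d h

theorem strip_nonspace (w : List Char) (h : ∀ c ∈ w, PySem.Chars.isspace c = false) :
    PySem.Chars.strip w = w := by
  have h1 : List.dropWhile PySem.Chars.isspace w = w := List.dropWhile_eq_self_iff.mpr (by
    intro hne; simp [h _ (List.getElem_mem hne)])
  have h2 : List.dropWhile PySem.Chars.isspace w.reverse = w.reverse := List.dropWhile_eq_self_iff.mpr (by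
    intro hne; simp; exact h _ (List.getElem_mem (by simp at hne ⊢; omega)))
  simp [PySem.Chars.strip, PySem.Chars.lstrip, PySem.Chars.rstrip, h1, h2]

theorem strip_mem_split₀ (s w : String) (hw : w ∈ PySem.Str.split₀ s) : PySem.Str.strip w = w := by
  rw [PySem.Str.split₀] at hw
  obtain ⟨u, hu, rfl⟩ := List.mem_map.mp hw
  apply String.toList_inj.mp
  rw [PySem.Str.toList_strip, String.toList_ofList]
  exact strip_nonspace u (split0Go_nonspace s.toList [] [] (by simp) (by simp) u hu)

-- A at String level, through pvComp
theorem A_eq (text : String) : padronizaTipoAcidente text =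
    PySem.Str.join " " ((PySem.Str.split₀ (String.ofList (pvComp (PySem.Str.lower text).toList))).map
      (fun palavra => PySem.Str.strip palavra)) := by
  unfold padronizaTipoAcidente
  simp only [PySem.Str.replace, String.toList_ofList, pvComp, pvRep,
    pvP1, pvP2, pvP3, pvP4, pvP5, pvP6, pvP7, pvT1, pvT5, pvT7]

-- ===== VERDICT (by name: the statements are the Claim_ definitions above) =====
theorem padronizaTipoAcidente_spec : Claim_equal_padronizaTipoAcidente := by
  intro text _ hpre
  unfold Spec_padronizaTipoAcidente
  have hnt : pvNoTrig (PySem.Str.lower text).toList := fun w hw hc =>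
    Bool.false_ne_true ((hpre w hw) ▸ (PySem.Str.isIn_iff_infix _ _).mpr hc)
  rw [A_eq, comp_scan (PySem.Str.lower text).toList.length _ le_rfl hnt]
  rw [List.map_congr_left (fun w hw => strip_mem_split₀ _ w hw), List.map_id']
  rfl
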